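-- pv_equiv track=rewrite | github.com/bckrlab/subroc | code/src/subroc/quality_functions/optimistic_estimates.py | contains_inversion
-- ===== SOURCE A (Python) =====
-- def contains_inversion(y_true):
--     """
--     Returns True if y_true is not just a (possibly empty) sequence of False values followed by
--     a (possibly empty) sequence of True values.
--     """
--     true_found = False
--
--     for label in y_true:
--         if (not true_found) and label:
--             true_found = True
--         if true_found and (not label):
--             return True
--
--     return False
-- ===== SOURCE B (Python) =====
-- def contains_inversion(y_true):
--     """An inversion exists iff the sequence is not non-decreasing (as booleans),
--     i.e. iff some ADJACENT pair goes truthy -> falsy."""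
--     ys = list(y_true)
--     return any(a and not b for a, b in zip(ys, ys[1:]))
-- ===== Notes on version B (the rewrite author's own statement) =====
-- stated objective: simpler
-- what changed: Replaces A's stateful scan carrying a true_found flag with a local adjacent-pair check: an inversion exists iff some neighbouring pair goes truthy->falsy, tested by any() over zip(ys, ys[1:]).
import Mathlib
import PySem

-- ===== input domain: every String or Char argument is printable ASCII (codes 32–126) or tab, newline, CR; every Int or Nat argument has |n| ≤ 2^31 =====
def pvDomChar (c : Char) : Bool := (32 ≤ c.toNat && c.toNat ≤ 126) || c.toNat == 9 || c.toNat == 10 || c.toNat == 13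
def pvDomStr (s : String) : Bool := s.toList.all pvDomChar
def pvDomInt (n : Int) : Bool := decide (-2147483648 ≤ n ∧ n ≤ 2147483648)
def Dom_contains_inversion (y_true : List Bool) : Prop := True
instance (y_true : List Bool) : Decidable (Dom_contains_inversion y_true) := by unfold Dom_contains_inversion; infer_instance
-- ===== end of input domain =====

-- B drops A's stateful true_found scan for a local adjacent-pair (truthy->falsy) check (simpler).

-- ===== PORT A =====
-- A's loop carries the mutable flag true_found; recursion over the list with that flag as state.
def containsInversionLoopA : List Bool → Bool → Bool
  | [], _ => false
  | label :: rest, true_found =>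
    let true_found' := if (!true_found) && label then true else true_found
    if true_found' && (!label) then true else containsInversionLoopA rest true_found'

def contains_inversion (y_true : List Bool) : Bool :=
  containsInversionLoopA y_true false

-- ===== PORT B =====
-- Source B: any(a and not b for a, b in zip(ys, ys[1:])) — adjacent pairs via zip with the tail slice.
def contains_inversion_alt (y_true : List Bool) : Bool :=
  (y_true.zip (PySem.List.slice y_true (some 1) none)).any (fun p => p.1 && !p.2)

-- ===== PRECONDITION & SPEC =====
def Spec_contains_inversion (y_true : List Bool) (out : Bool) : Prop := out = contains_inversion_alt y_true
instance (y_true : List Bool) (out : Bool) : Decidable (Spec_contains_inversion y_true out) := by unfold Spec_contains_inversion; infer_instance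

-- ===== CLAIM =====
def Claim_equal_contains_inversion : Prop := ∀ (y_true : List Bool), Dom_contains_inversion y_true → Spec_contains_inversion y_true (contains_inversion y_true)

-- ===== LEMMAS AND PROOFS =====

theorem alt_drop (xs : List Bool) :
    contains_inversion_alt xs = (xs.zip (xs.drop 1)).any (fun p => p.1 && !p.2) := by
  simp [contains_inversion_alt, PySem.List.slice_from_one, List.drop_one]

-- After the first truthy element, B's pair check on true::rest is 'some later element is false'.
theorem alt_true_cons (rest : List Bool) :
    contains_inversion_alt (true :: rest) = !(rest.all id) := by
  induction rest with
  | nil => simp [alt_drop]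
  | cons y t ih =>
    cases y <;> simp_all [alt_drop]

-- Once A's flag is set, its loop returns true iff some remaining element is false.
theorem loopA_true_eq_not_all (xs : List Bool) :
    containsInversionLoopA xs true = !(xs.all id) := by
  induction xs with
  | nil => rfl
  | cons x t ih =>
    cases x <;> simp [containsInversionLoopA, ih]

theorem loopA_false_eq_alt (xs : List Bool) :
    containsInversionLoopA xs false = contains_inversion_alt xs := by
  induction xs with
  | nil => simp [alt_drop, containsInversionLoopA]
  | cons x t ih =>
    cases x with
    | false =>
      rw [show containsInversionLoopA (false :: t) false = containsInversionLoopA t false from rfl, ih]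
      cases t <;> simp [alt_drop]
    | true =>
      simp [containsInversionLoopA, loopA_true_eq_not_all, alt_true_cons]

-- ===== VERDICT =====
theorem contains_inversion_spec : Claim_equal_contains_inversion := by
  intro y_true _
  unfold Spec_contains_inversion contains_inversion
  exact loopA_false_eq_alt y_true
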